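-- pv_equiv track=rewrite | github.com/ananda17gb/IndonesianSentenceParser-TBA-FP | tokens.py | classify_tokens
-- ===== SOURCE A (Python) =====
-- def classify_tokens(tokens):
--     subjects = ["1", "2", "3", "4", "5"]
--     predicates = ["6", "7", "8", "9", "10"]
--     objects = ["11", "12", "13", "14", "15"]
--     adverbs = ["16", "17", "18", "19", "20"]
--
--     structure = " => "
--
--     for token in tokens:
--         if token != "#":
--             if token in subjects:
--                 structure += "S "
--             elif token in predicates:
--                 structure += "P "
--             elif token in objects:
--                 structure += "O "
--             elif token in adverbs:
--                 structure += "K "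
--
--     return structure
-- ===== SOURCE B (Python) =====
-- # Positional rewrite: one ordered token list, label computed from index arithmetic,
-- # assembled by a separator join instead of incremental appends.
-- _ORDER = [str(n) for n in range(1, 21)]
--
--
-- def classify_tokens(tokens):
--     labels = ["SPOK"[_ORDER.index(t) // 5] for t in tokens if t in _ORDER]
--     return " => " + " ".join(labels) + (" " if labels else "")
-- ===== Notes on version B (the rewrite author's own statement) =====
-- stated objective: alternative
-- what changed: Replaces the four cascading membership branches with arithmetic bucketing on the token's index in one ordered list ("SPOK"[index//5]) and assembles the result with a separator join plus one conditional trailing space instead of incremental appends.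
import Mathlib
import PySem

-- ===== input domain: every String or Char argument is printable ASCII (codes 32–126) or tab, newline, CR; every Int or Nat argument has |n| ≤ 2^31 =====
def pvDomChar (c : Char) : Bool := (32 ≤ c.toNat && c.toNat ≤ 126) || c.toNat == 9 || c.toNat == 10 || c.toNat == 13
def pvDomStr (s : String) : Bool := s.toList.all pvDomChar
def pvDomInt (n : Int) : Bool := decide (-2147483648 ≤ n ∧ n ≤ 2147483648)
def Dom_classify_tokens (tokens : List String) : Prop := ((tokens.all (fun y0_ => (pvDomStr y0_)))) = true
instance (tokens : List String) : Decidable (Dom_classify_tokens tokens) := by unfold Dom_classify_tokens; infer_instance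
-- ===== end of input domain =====

-- B replaces A's four cascading membership branches with arithmetic bucketing on the token's
-- index in one ordered list ("SPOK"[index//5]) and a separator join (objective: alternative).

-- ===== PORT A =====
def classify_tokens (tokens : List String) : String :=
  tokens.foldl (fun structure_ token =>
    if token ≠ "#" then
      if token ∈ ["1", "2", "3", "4", "5"] then structure_ ++ "S "
      else if token ∈ ["6", "7", "8", "9", "10"] then structure_ ++ "P "
      else if token ∈ ["11", "12", "13", "14", "15"] then structure_ ++ "O "
      else if token ∈ ["16", "17", "18", "19", "20"] then structure_ ++ "K "
      else structure_
    else structure_) " => "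

-- ===== PORT B =====
-- Source B's _ORDER = [str(n) for n in range(1, 21)]
def pvOrder : List String := (PySem.List.pyRange 1 21 1).map PySem.Int.toStr

-- the comprehension element: "SPOK"[_ORDER.index(t) // 5] under the guard 't in _ORDER'
def pvLabelOf (t : String) : Option String :=
  if pvOrder.contains t then
    (PySem.List.index? pvOrder t).bind (fun i =>
      (PySem.Str.pyGet? "SPOK" (PySem.Int.floordiv (i : Int) 5)).map (fun c => String.ofList [c]))
  else none

def classify_tokens_alt (tokens : List String) : String :=
  let labels := tokens.filterMap pvLabelOf
  " => " ++ PySem.Str.join " " labels ++ (if labels.isEmpty then "" else " ")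

-- ===== PRECONDITION & SPEC =====
def Spec_classify_tokens (tokens : List String) (out : String) : Prop := out = classify_tokens_alt tokens
instance (tokens : List String) (out : String) : Decidable (Spec_classify_tokens tokens out) := by unfold Spec_classify_tokens; infer_instance

-- ===== CLAIM =====
def Claim_equal_classify_tokens : Prop := ∀ (tokens : List String), Dom_classify_tokens tokens → Spec_classify_tokens tokens (classify_tokens tokens)

-- ===== LEMMAS AND PROOFS =====

theorem pvOrder_eval : pvOrder =
    ["1", "2", "3", "4", "5", "6", "7", "8", "9", "10",
     "11", "12", "13", "14", "15", "16", "17", "18", "19", "20"] := by rfl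

theorem pv_join_empty_nil : PySem.Str.join "" ([] : List String) = "" := by
  apply String.toList_inj.mp
  simp [PySem.Chars.join_nil]

theorem pv_join_empty_cons (x : String) (l : List String) :
    PySem.Str.join "" (x :: l) = x ++ PySem.Str.join "" l := by
  apply String.toList_inj.mp
  cases l with
  | nil => simp [PySem.Chars.join_singleton, PySem.Chars.join_nil]
  | cons b bs => simp [PySem.Chars.join_cons_cons]

set_option maxHeartbeats 2000000 in
theorem pv_step_eq (acc t : String) :
    (if t ≠ "#" then
      if t ∈ ["1", "2", "3", "4", "5"] then acc ++ "S "
      else if t ∈ ["6", "7", "8", "9", "10"] then acc ++ "P "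
      else if t ∈ ["11", "12", "13", "14", "15"] then acc ++ "O "
      else if t ∈ ["16", "17", "18", "19", "20"] then acc ++ "K "
      else acc
    else acc) = acc ++ (((pvLabelOf t).map (· ++ " ")).getD "") := by
  by_cases h0 : t = "#"
  · subst h0; simp [pvLabelOf, pvOrder_eval, String.append_empty]
  by_cases h1 : t = "1"
  · subst h1; rfl
  by_cases h2 : t = "2"
  · subst h2; rfl
  by_cases h3 : t = "3"
  · subst h3; rfl
  by_cases h4 : t = "4"
  · subst h4; rfl
  by_cases h5 : t = "5"
  · subst h5; rfl
  by_cases h6 : t = "6"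
  · subst h6; rfl
  by_cases h7 : t = "7"
  · subst h7; rfl
  by_cases h8 : t = "8"
  · subst h8; rfl
  by_cases h9 : t = "9"
  · subst h9; rfl
  by_cases h10 : t = "10"
  · subst h10; rfl
  by_cases h11 : t = "11"
  · subst h11; rfl
  by_cases h12 : t = "12"
  · subst h12; rfl
  by_cases h13 : t = "13"
  · subst h13; rfl
  by_cases h14 : t = "14"
  · subst h14; rfl
  by_cases h15 : t = "15"
  · subst h15; rfl
  by_cases h16 : t = "16"
  · subst h16; rfl
  by_cases h17 : t = "17"
  · subst h17; rfl
  by_cases h18 : t = "18"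
  · subst h18; rfl
  by_cases h19 : t = "19"
  · subst h19; rfl
  by_cases h20 : t = "20"
  · subst h20; rfl
  have hm : t ∉ pvOrder := by
    rw [pvOrder_eval]
    simp [h1, h2, h3, h4, h5, h6, h7, h8, h9, h10, h11, h12, h13, h14, h15, h16, h17, h18, h19, h20]
  simp [pvLabelOf, hm, h0, h1, h2, h3, h4, h5, h6, h7, h8, h9, h10, h11, h12, h13, h14, h15,
    h16, h17, h18, h19, h20, String.append_empty]

set_option maxHeartbeats 1000000 in
theorem pv_fold_eq (l : List String) (acc : String) :
    l.foldl (fun structure_ token =>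
      if token ≠ "#" then
        if token ∈ ["1", "2", "3", "4", "5"] then structure_ ++ "S "
        else if token ∈ ["6", "7", "8", "9", "10"] then structure_ ++ "P "
        else if token ∈ ["11", "12", "13", "14", "15"] then structure_ ++ "O "
        else if token ∈ ["16", "17", "18", "19", "20"] then structure_ ++ "K "
        else structure_
      else structure_) acc
    = acc ++ PySem.Str.join "" ((l.filterMap pvLabelOf).map (· ++ " ")) := by
  induction l generalizing acc with
  | nil => rw [List.foldl_nil, List.filterMap_nil, List.map_nil, pv_join_empty_nil, String.append_empty]
  | cons t rest ih =>
    simp only [List.foldl_cons]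
    rw [pv_step_eq acc t, ih]
    cases h : pvLabelOf t with
    | none => simp [h, String.append_empty]
    | some lab =>
      simp [h, pv_join_empty_cons, String.append_assoc]

-- join "" (map (· ++ " ") ls) = join " " ls plus one trailing space when ls ≠ []
theorem pv_assemble (ls : List String) :
    PySem.Str.join "" (ls.map (· ++ " "))
      = PySem.Str.join " " ls ++ (if ls.isEmpty then "" else " ") := by
  induction ls with
  | nil =>
    simp only [List.map_nil, List.isEmpty_nil, if_pos]
    rw [pv_join_empty_nil]
    apply String.toList_inj.mp
    simp [PySem.Chars.join_nil]
  | cons x xs ih =>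
    rw [List.map_cons, pv_join_empty_cons, ih]
    cases xs with
    | nil =>
      apply String.toList_inj.mp
      simp [PySem.Chars.join_singleton, PySem.Chars.join_nil, String.append_empty]
    | cons b bs =>
      apply String.toList_inj.mp
      simp [PySem.Chars.join_cons_cons, String.append_assoc]

-- ===== VERDICT =====
theorem classify_tokens_spec : Claim_equal_classify_tokens := by
  intro tokens _
  unfold Spec_classify_tokens classify_tokens classify_tokens_alt
  rw [pv_fold_eq tokens " => ", pv_assemble, String.append_assoc]
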